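-- pv_equiv track=rewrite | github.com/Jakeprivate-man/zeroclaw | streamlit-app/components/dashboard/cost_tracking.py | _get_model_colors
-- ===== SOURCE A (Python) =====
-- def _get_model_colors(count: int) -> list:
--     """Get a list of Matrix-themed colors for model breakdown.
--
--     Args:
--         count: Number of colors needed
--
--     Returns:
--         List of hex color strings
--     """
--     # Matrix green palette (from light to dark)
--     palette = [
--         "#5FAF87",  # Mint green
--         "#87D7AF",  # Sea green
--         "#5FD7AF",  # Turquoise
--         "#87FFAF",  # Light aqua
--         "#5FD787",  # Medium green
--         "#87D787",  # Sage green
--     ]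
--
--     # Cycle through palette if more colors needed
--     colors = []
--     for i in range(count):
--         colors.append(palette[i % len(palette)])
--
--     return colors
-- ===== SOURCE B (Python) =====
-- def _get_model_colors(count: int) -> list:
--     """Get a list of Matrix-themed colors for model breakdown (repeat-and-slice)."""
--     palette = [
--         "#5FAF87",  # Mint green
--         "#87D7AF",  # Sea green
--         "#5FD7AF",  # Turquoise
--         "#87FFAF",  # Light aqua
--         "#5FD787",  # Medium green
--         "#87D787",  # Sage green
--     ]
--     reps = count // len(palette) + 1
--     return (palette * reps)[:count]
-- ===== Notes on version B (the rewrite author's own statement) =====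
-- stated objective: simpler
-- what changed: Replaced the per-index loop with modulo lookups by a closed-form repeat-and-slice: build palette * (count//6 + 1) once and take the first count elements.
import Mathlib
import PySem

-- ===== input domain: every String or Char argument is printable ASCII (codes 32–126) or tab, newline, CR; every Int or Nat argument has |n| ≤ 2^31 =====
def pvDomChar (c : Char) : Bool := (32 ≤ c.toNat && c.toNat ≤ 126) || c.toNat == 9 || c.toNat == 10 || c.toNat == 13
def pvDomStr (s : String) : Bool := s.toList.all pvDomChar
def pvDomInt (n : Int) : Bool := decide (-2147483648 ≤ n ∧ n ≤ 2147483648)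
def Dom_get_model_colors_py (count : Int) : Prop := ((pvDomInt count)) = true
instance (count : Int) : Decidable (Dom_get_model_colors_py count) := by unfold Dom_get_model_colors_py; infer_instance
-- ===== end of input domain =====

-- B replaces A's index loop with modulo lookups by a closed-form repeat-and-slice (objective: simpler).

-- ===== PORT A =====
-- the fixed Matrix-green palette (module constant inside _get_model_colors)
def pvPalette : List String :=
  ["#5FAF87", "#87D7AF", "#5FD7AF", "#87FFAF", "#5FD787", "#87D787"]

-- loop 'for i in range(count): colors.append(palette[i % len(palette)])';
-- palette[i % 6] is always in range (0 ≤ i, so 0 ≤ i % 6 < 6), hence pyGetD's default is never used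
def get_model_colors_py (count : Int) : List String :=
  (PySem.List.pyRange 0 count 1).foldl
    (fun colors i => colors ++ [PySem.List.pyGetD pvPalette (PySem.Int.mod i 6) ""]) []

-- ===== PORT B =====
-- reps = count // 6 + 1;  return (palette * reps)[:count]
def get_model_colors_py_alt (count : Int) : List String :=
  let reps : Int := PySem.Int.floordiv count 6 + 1
  PySem.List.slice (PySem.List.pyRepeat pvPalette reps) none (some count)

-- ===== PRECONDITION & SPEC =====
def Spec_get_model_colors_py (count : Int) (out : List String) : Prop := out = get_model_colors_py_alt count
instance (count : Int) (out : List String) : Decidable (Spec_get_model_colors_py count out) := by unfold Spec_get_model_colors_py; infer_instance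

-- ===== CLAIM (what is proved, stated in full; the proofs are below) =====
def Claim_equal_get_model_colors_py : Prop := ∀ (count : Int), Dom_get_model_colors_py count → Spec_get_model_colors_py count (get_model_colors_py count)

-- ===== LEMMAS AND PROOFS =====

-- element i of palette repeated m times is palette[i % 6]
theorem pv_rep_get (m i : Nat) (h : i < 6 * m) :
    ((List.replicate m pvPalette).flatten)[i]? = pvPalette[i % 6]? := by
  induction m generalizing i with
  | zero => omega
  | succ m ih =>
    rw [List.replicate_succ, List.flatten_cons]
    by_cases hi : i < 6
    · rw [List.getElem?_append_left (by simp [pvPalette]; omega)]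
      congr 1
      omega
    · rw [List.getElem?_append_right (by simp [pvPalette]; omega)]
      have h6 : pvPalette.length = 6 := by decide
      rw [h6, ih (i - 6) (by omega)]
      congr 1
      omega

-- the core closed-form identity, stated over Nat
theorem pv_core (n : Nat) :
    (List.range n).map (fun k => pvPalette.getD (k % 6) "") =
      ((List.replicate (n / 6 + 1) pvPalette).flatten).take n := by
  apply List.ext_getElem?
  intro i
  by_cases hi : i < n
  · rw [List.getElem?_take_of_lt hi, List.getElem?_map, List.getElem?_range hi]
    have hlt : i % 6 < 6 := by omega
    have hrep : i < 6 * (n / 6 + 1) := by omega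
    rw [pv_rep_get _ i hrep]
    simp only [Option.map_some]
    have h6 : pvPalette.length = 6 := by decide
    rw [List.getElem?_eq_getElem (by omega), List.getD_eq_getElem _ _ (by omega)]
  · rw [List.getElem?_eq_none (by simpa using hi),
        List.getElem?_eq_none (by simp; omega)]

theorem get_model_colors_py_spec : Claim_equal_get_model_colors_py := by
  intro count _
  unfold Spec_get_model_colors_py get_model_colors_py get_model_colors_py_alt
  rw [PySem.List.foldl_append_singleton_eq_map, List.nil_append]
  by_cases hc : count < 0
  · -- range(count) is empty, and reps ≤ 0 makes palette * reps empty, [:count] of [] is []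
    rw [PySem.List.pyRange_one_eq_nil (le_of_lt hc)]
    have hreps : (PySem.Int.floordiv count 6 + 1).toNat = 0 := by
      have := PySem.Int.floordiv_eq_iff_of_pos (a := count) (b := 6)
        (q := PySem.Int.floordiv count 6) (by omega)
      have h1 : PySem.Int.floordiv count 6 * 6 ≤ count ∧
          count < (PySem.Int.floordiv count 6 + 1) * 6 := (this.mp rfl)
      omega
    simp only [PySem.List.pyRepeat, hreps, List.replicate_zero, List.flatten_nil]
    simp [PySem.List.slice]
  · -- positive count: reduce to the Nat identity pv_core
    rw [Int.not_lt] at hc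
    obtain ⟨n, rfl⟩ : ∃ n : Nat, count = (n : Int) :=
      ⟨count.toNat, (Int.toNat_of_nonneg hc).symm⟩
    rw [PySem.List.pyRange_one, List.map_map]
    have hf : ((fun i => PySem.List.pyGetD pvPalette (PySem.Int.mod i 6) "") ∘
        fun k : Nat => (0 : Int) + (k : Int)) =
        fun k : Nat => pvPalette.getD (k % 6) "" := by
      funext k
      simp only [Function.comp, zero_add]
      rw [PySem.Int.mod_eq_emod_of_pos (by omega)]
      have : ((k : Int) % 6) = ((k % 6 : Nat) : Int) := by push_cast; rfl
      rw [this, PySem.List.pyGetD_natCast]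
    rw [hf]
    have hsub : ((n : Int) - 0).toNat = n := by omega
    rw [hsub, pv_core n]
    rw [PySem.List.slice_to _ (by omega)]
    have hfd : PySem.Int.floordiv (n : Int) 6 = ((n / 6 : Nat) : Int) := by
      exact_mod_cast PySem.Int.floordiv_natCast n 6
    have h2 : (PySem.Int.floordiv (n : Int) 6 + 1).toNat = n / 6 + 1 := by
      rw [hfd]; omega
    rw [PySem.List.pyRepeat, h2, Int.toNat_natCast]
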